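-- pv_equiv track=rewrite | github.com/IronForce-Auscent/s3_openhouse_computing | vigenere_fixed.py | generate_shifted_alphabet
-- ===== SOURCE A (Python) =====
-- def generate_shifted_alphabet(key: str):
--     """
--     Generates a shifted alphabet for a Vigenere Cipher using the provided key.
--
--     Arguments:
--         - key (str): The key used to generate the shifted alphabet.
--
--     Returns:
--         - shifted_alphabet (list): A list containing the shifted alphabets for the Vigenere Cipher.
--     """
--     # Create a list to store the shifted alphabet
--     shifted_alphabet = []
--
--     # Iterate over each character in the key
--     for i, char in enumerate(key):
--         # Calculate the shift amount for the current character
--         shift_amount = ord(char) - ord('a')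
--
--         # Generate the shifted alphabet for the current character
--         shifted_letters = []
--         for j in range(26):
--             shifted_letters.append(chr((j + shift_amount) % 26 + ord('a')))
--
--         # Add the shifted alphabet for the current character to the list
--         shifted_alphabet.append(shifted_letters)
--
--     return shifted_alphabet
-- ===== SOURCE B (Python) =====
-- def generate_shifted_alphabet(key: str):
--     base = 'abcdefghijklmnopqrstuvwxyz'
--     shifted_alphabet = []
--     for char in key:
--         s = (ord(char) - ord('a')) % 26
--         shifted_alphabet.append(list(base[s:] + base[:s]))
--     return shifted_alphabet
-- ===== Notes on version B (the rewrite author's own statement) =====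
-- stated objective: idiomatic
-- what changed: Each shifted row is produced by rotating one fixed base alphabet string with a two-slice concatenation after reducing the shift mod 26 once, instead of computing each of the 26 letters individually with per-index modular arithmetic on character codes; the per-row work moves from a 26-iteration Python loop to built-in slice/concat operations.
import Mathlib
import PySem

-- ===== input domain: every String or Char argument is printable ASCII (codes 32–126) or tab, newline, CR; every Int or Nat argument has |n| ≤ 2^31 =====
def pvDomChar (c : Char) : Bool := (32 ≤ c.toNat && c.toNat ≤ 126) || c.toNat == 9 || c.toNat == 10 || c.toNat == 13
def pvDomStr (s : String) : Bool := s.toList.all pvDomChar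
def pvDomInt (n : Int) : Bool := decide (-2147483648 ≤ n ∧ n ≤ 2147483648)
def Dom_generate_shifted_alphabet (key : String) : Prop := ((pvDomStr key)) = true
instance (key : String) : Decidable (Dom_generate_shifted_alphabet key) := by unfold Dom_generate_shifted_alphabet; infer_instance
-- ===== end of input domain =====

-- ===== PORT A =====
-- B rotates a fixed base alphabet with two slices per key character instead of per-index modular arithmetic; same cost, more idiomatic.

-- inner loop of A: shifted_letters built over range(26)
def pvRowA (shift : Int) : List String :=
  (PySem.List.pyRange 0 26 1).foldl
    (fun acc j => acc ++ [String.ofList [Char.ofNat (PySem.Int.mod (j + shift) 26 + 97).toNat]]) []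

def generate_shifted_alphabet (key : String) : List (List String) :=
  key.toList.foldl (fun acc char => acc ++ [pvRowA ((char.toNat : Int) - 97)]) []

-- ===== PORT B =====
def pvBase : List Char := "abcdefghijklmnopqrstuvwxyz".toList

-- loop body of B: s = (ord(char)-97) % 26; list(base[s:] + base[:s])
def pvRowB (t : Int) : List String :=
  let s := PySem.Int.mod t 26
  (PySem.List.slice pvBase (some s) none ++ PySem.List.slice pvBase none (some s)).map
    (fun ch => String.ofList [ch])

def generate_shifted_alphabet_alt (key : String) : List (List String) :=
  key.toList.foldl (fun acc char => acc ++ [pvRowB ((char.toNat : Int) - 97)]) []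

-- ===== PRECONDITION & SPEC =====
def Spec_generate_shifted_alphabet (key : String) (out : List (List String)) : Prop := out = generate_shifted_alphabet_alt key
instance (key : String) (out : List (List String)) : Decidable (Spec_generate_shifted_alphabet key out) := by unfold Spec_generate_shifted_alphabet; infer_instance

-- ===== CLAIM (what is proved, stated in full; the proofs are below) =====
def Claim_equal_generate_shifted_alphabet : Prop := ∀ (key : String), Dom_generate_shifted_alphabet key → Spec_generate_shifted_alphabet key (generate_shifted_alphabet key)

-- ===== LEMMAS AND PROOFS =====

lemma pvRowA_mod (t : Int) : pvRowA t = pvRowA (PySem.Int.mod t 26) := by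
  have hm : ∀ j : Int, PySem.Int.mod (j + t) 26 = PySem.Int.mod (j + PySem.Int.mod t 26) 26 := by
    intro j
    rw [PySem.Int.mod_eq_emod_of_pos (a := t) (b := 26) (by norm_num),
      PySem.Int.mod_eq_emod_of_pos (a := j + t) (b := 26) (by norm_num),
      PySem.Int.mod_eq_emod_of_pos (a := j + t % 26) (b := 26) (by norm_num)]
    omega
  simp only [pvRowA, PySem.List.pyRange, hm]

lemma pvRow_eq_of_range (s : Int) (h0 : 0 ≤ s) (h1 : s < 26) : pvRowA s = pvRowB s := by
  interval_cases s <;> decide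

lemma pvRow_eq (t : Int) : pvRowA t = pvRowB t := by
  have h0 : (0:Int) ≤ PySem.Int.mod t 26 := PySem.Int.mod_nonneg _ (by norm_num)
  have h1 : PySem.Int.mod t 26 < 26 := PySem.Int.mod_lt _ (by norm_num)
  have hidem : PySem.Int.mod (PySem.Int.mod t 26) 26 = PySem.Int.mod t 26 := by
    rw [PySem.Int.mod_eq_emod_of_pos (a := t) (b := 26) (by norm_num),
      PySem.Int.mod_eq_emod_of_pos (b := 26) (by norm_num)]
    omega
  rw [pvRowA_mod, pvRow_eq_of_range _ h0 h1]
  simp only [pvRowB, hidem]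

-- ===== VERDICT (by name: the statement is the Claim_ definition above) =====
theorem generate_shifted_alphabet_spec : Claim_equal_generate_shifted_alphabet := by
  intro key _
  unfold Spec_generate_shifted_alphabet generate_shifted_alphabet generate_shifted_alphabet_alt
  simp only [PySem.List.foldl_append_singleton_eq_map, pvRow_eq]
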